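/-
  jsmn_s.bin (-DJSMN_STRICT -DJSMN_PARENT_LINKS): `jsmn_parse` (901 bytes at 1002A9H, 248 instructions) — THE COMPOSITION of the regions of
  Prog/Jsmn/S/ParseInv.lean: prologue, then the main loop by `Reach.loopOn` (the measure is the model's fuel), each trip = loop head + dispatch
  (compare chain / jump table), one `case`, `pos++`; the exits = the final scan + the epilogue, or a `return` inside a case + the epilogue, or the
  `default: return JSMN_ERROR_INVAL` of strict mode (part of the loop-head region) + the epilogue.
  Proved here / in ParseEntry, ParseHead: entry, head (with `default:`), `pos++`, ':' and white space, epilogue. Hypotheses: the six other regions.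
-/
import Prog.Jsmn.S.ParseEntry
import Prog.Jsmn.S.ParseHead

namespace X86
namespace J6
namespace S
open X86.User (CodeAt RegsKept Span FlagsOK Layout toNat_add_ofNat toNat_ofNat_lt' add_ofNat_add)
open Jsmn

set_option linter.unusedVariables false

/-- The model's body for a white-space character: nothing happens. -/
theorem body_ws (js : List UInt8) (fuel numTokens : Nat) (s : St) (ch : UInt8) (h : ch = 0x09 ∨ ch = 0x0d ∨ ch = 0x0a ∨ ch = 0x20) :
    body Config.strictLinks js fuel numTokens s ch = some (.next s) := by
  rcases h with rfl | rfl | rfl | rfl <;> simp [body]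

/-- The model's body for a character of strict mode's `default:`. -/
theorem body_inval (js : List UInt8) (fuel numTokens : Nat) (s : St) (ch : UInt8) (h : InvalChar ch) :
    body Config.strictLinks js fuel numTokens s ch = some (.ret JSMN_ERROR_INVAL s) := by
  obtain ⟨h1, h2, h3, h4, h5, h6, h7, h8, h9, h10, h11, h12⟩ := h
  simp [body, h1, h2, h3, h4, h5, h6, h7, h8, h9, h10, h11, h12, strict_strictLinks]

/-- One `case` of the switch, whichever the dispatch chose: the machine does what `Jsmn.body` says. -/
theorem case_reach {n : User.Layout} (sf : SafeFacts binS.cfg) (hopen : OpenSpec n) (hstr : StringSpec n) (hprim : PrimitiveSpec n) (hclose : CloseSpec n)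
    (hcomma : CommaSpec n) {c : PCtx} {v0 v : User.State} {s : St} {addr : Word} (fuel : Nat)
    (hd : Dispatch (charAt c.js s.p.pos) addr) (hat : AtCase c n v0 v s addr (charAt c.js s.p.pos))
    (hne : body Config.strictLinks c.js fuel c.numTokens s (charAt c.js s.p.pos) ≠ none) :
    Reach n v (fun v' => Outcome c n v0 v' (body Config.strictLinks c.js fuel c.numTokens s (charAt c.js s.p.pos))) := by
  rcases hd with ⟨hch, rfl⟩ | ⟨hch, rfl⟩ | ⟨hch, rfl⟩ | ⟨hch, rfl⟩ | ⟨hch, rfl⟩ | ⟨hch, rfl⟩ | ⟨hch, rfl⟩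
  · exact colon_spec sf n c v0 v s _ fuel hch hat hne
  · exact hstr c v0 v s _ fuel hch hat hne
  · exact hopen c v0 v s _ fuel hch hat hne
  · exact hclose c v0 v s _ fuel hch hat hne
  · exact hcomma c v0 v s _ fuel hch hat hne
  · rw [body_ws _ _ _ _ _ hch]
    exact Reach.done ⟨hat.rip, hat.frame⟩
  · exact hprim c v0 v s _ fuel hch hat hne

/-- One trip round the main loop: out (with the function's postcondition), or back at the loop head with less fuel. -/
theorem loop_trip {n : User.Layout} (sf : SafeFacts binS.cfg) (hopen : OpenSpec n) (hstr : StringSpec n) (hprim : PrimitiveSpec n) (hclose : CloseSpec n)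
    (hcomma : CommaSpec n) (hfinal : FinalSpec n) (c : PCtx) (v0 : User.State) (res : Int × St) (k : Nat) (v : User.State)
    (hi : MainInv c n v0 res k v) :
    Reach n v (fun v' => ScanPost binS binS.useParse v0 c.ret c.pa c.tb c.numTokens c.toks0 res.1 res.2.p res.2.toks v' ∨
      ∃ k', k' < k ∧ MainInv c n v0 res k' v') := by
  obtain ⟨hrip, s, hfr, hloop⟩ := hi
  refine (head_spec n c v0 v s hrip hfr).trans ?_
  intro v2 h
  rcases h with ⟨hmore, hfin⟩ | ⟨addr, hd, hat⟩ | ⟨hmore, hinval, hret⟩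
  · -- the loop test failed: the final scan, the epilogue
    cases k with
    | zero => simp [loop] at hloop
    | succ k' =>
      simp only [loop, hmore, Bool.false_eq_true, if_false, Option.some.injEq] at hloop
      subst hloop
      exact ((hfinal c v0 v2 s hfin).trans fun v3 hret => epilogue_spec n c v0 v3 _ s hret).mono fun _ h => Or.inl h
  · -- one case of the switch
    have hmore := hat.more
    cases k with
    | zero => simp [loop] at hloop
    | succ k' =>
      simp only [loop, hmore, if_true] at hloop
      have hne : body Config.strictLinks c.js (k' + 1) c.numTokens s (charAt c.js s.p.pos) ≠ none := by
        intro h0; rw [h0] at hloop; simp at hloop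
      refine (case_reach sf hopen hstr hprim hclose hcomma (k' + 1) hd hat hne).trans ?_
      intro v3 ho
      cases hb : body Config.strictLinks c.js (k' + 1) c.numTokens s (charAt c.js s.p.pos) with
      | none => exact absurd hb hne
      | some st =>
        rw [hb] at ho hloop
        cases st with
        | next s' =>
          refine (next_spec n c v0 v3 s' ho).mono ?_
          intro v4 ⟨hrip4, hfr4⟩
          exact Or.inr ⟨k', Nat.lt_succ_self _, hrip4, _, hfr4, hloop⟩
        | ret r' s' =>
          simp only [Option.some.injEq] at hloop
          subst hloop
          exact (epilogue_spec n c v0 v3 r' s' ho).mono fun _ h => Or.inl h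
  · -- strict mode's `default: return JSMN_ERROR_INVAL`
    cases k with
    | zero => simp [loop] at hloop
    | succ k' =>
      simp only [loop, hmore, if_true] at hloop
      rw [body_inval _ _ _ _ _ hinval] at hloop
      simp only [Option.some.injEq] at hloop
      subst hloop
      exact (epilogue_spec n c v0 v2 _ s hret).mono fun _ h => Or.inl h

/-- **jsmn_parse (strict, parent links) computes `Jsmn.parseFuel`**, given the six case regions (`OpenSpec` … `FinalSpec`, proved in the other Parse*.lean files). -/
theorem parse_spec {n : User.Layout} (sf : SafeFacts binS.cfg) (hopen : OpenSpec n) (hstr : StringSpec n) (hprim : PrimitiveSpec n) (hclose : CloseSpec n)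
    (hcomma : CommaSpec n) (hfinal : FinalSpec n) : ParseSpec binS n := by
  intro v0 ret pa jsA tb js numTokens p toks fuel r p' toks' hpre hr8 hinv hpf
  let c : PCtx := ⟨ret, pa, jsA, tb, js, numTokens, p, toks⟩
  have he : Entry c n v0 := ⟨hpre, hr8, hinv⟩
  change (loop Config.strictLinks js numTokens fuel ⟨p, toks, i32 p.toknext⟩).map (fun (r, s) => (r, s.p, s.toks)) = some (r, p', toks') at hpf
  cases hl : loop Config.strictLinks js numTokens fuel ⟨p, toks, i32 p.toknext⟩ with
  | none => rw [hl] at hpf; simp at hpf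
  | some res =>
    rw [hl] at hpf
    simp only [Option.map_some, Option.some.injEq, Prod.mk.injEq] at hpf
    obtain ⟨rfl, rfl, rfl⟩ := hpf
    refine (entry_spec n c v0 he).trans ?_
    intro v1 ⟨hrip, hfr⟩
    exact Reach.loopOn (Inv := MainInv c n v0 res) (loop_trip sf hopen hstr hprim hclose hcomma hfinal c v0 res) fuel v1 ⟨hrip, _, hfr, hl⟩

end S
end J6
end X86
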